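-- pv_equiv track=rewrite | github.com/gambiTarun/Leetcode-Solutions | 2431-maximize-total-tastiness-of-purchased-fruits/2431-maximize-total-tastiness-of-purchased-fruits.py | maxTastiness
-- ===== SOURCE A (Python) =====
-- from typing import List
--
-- def maxTastiness(price: List[int], tastiness: List[int], maxAmount: int, maxCoupons: int) -> int:
--
--     dp = [[[0]*(maxCoupons+1) for _ in range(maxAmount+1)] for _ in range(len(price)+1)]
--
--     for i in range(1,len(price)+1):
--         for j in range(maxAmount+1):
--             for k in range(maxCoupons+1):
--                 dp[i][j][k] = dp[i-1][j][k]
--                 if j-price[i-1]>=0: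
--                     dp[i][j][k] = max(dp[i][j][k], dp[i-1][j-price[i-1]][k]+tastiness[i-1])
--                 if k>0 and j-price[i-1]//2>=0:
--                     dp[i][j][k] = max(dp[i][j][k], dp[i-1][j-price[i-1]//2][k-1]+tastiness[i-1])
--
--     return dp[len(price)][maxAmount][maxCoupons]
-- ===== SOURCE B (Python) =====
-- def maxTastiness(price, tastiness, maxAmount, maxCoupons):
--     # Need-driven two-pass DP: compute only the (amount, coupons) states reachable
--     # from (maxAmount, maxCoupons), level by level, then evaluate them bottom-up.
--     n = len(price)
--     levels = [{(maxAmount, maxCoupons)}]  # levels (top-down): states needed after deciding the last d items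
--     for p in reversed(price):
--         h = p // 2
--         nxt = set()
--         for (a, k) in levels[-1]:
--             nxt.add((a, k))
--             if a - p >= 0:
--                 nxt.add((a - p, k))
--             if k > 0 and a - h >= 0:
--                 nxt.add((a - h, k - 1))
--         levels.append(nxt)
--     levels.reverse()  # now levels[i] = states needed when the first i items are available
--     vals = {s: 0 for s in levels[0]}
--     for i in range(1, n + 1):
--         p, t, h = price[i - 1], tastiness[i - 1], price[i - 1] // 2
--         new = {}
--         for (a, k) in levels[i]:
--             best = vals[(a, k)]
--             if a - p >= 0:
--                 best = max(best, vals[(a - p, k)] + t)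
--             if k > 0 and a - h >= 0:
--                 best = max(best, vals[(a - h, k - 1)] + t)
--             new[(a, k)] = best
--         vals = new
--     return vals[(maxAmount, maxCoupons)]
-- ===== Notes on version B (the rewrite author's own statement) =====
-- stated objective: alternative
-- what changed: Replaces A's full (n+1)x(maxAmount+1)x(maxCoupons+1) bottom-up table with a need-driven two-pass DP: a first pass computes, level by level down from (maxAmount, maxCoupons), the set of (amount, coupons) states actually reachable, and a second pass evaluates the same recurrence bottom-up on only those states, stored in dicts.
-- outside the precondition, e.g. on maxTastiness([100], [], 0, 0): A returns 0, B raises IndexError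
import Mathlib
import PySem

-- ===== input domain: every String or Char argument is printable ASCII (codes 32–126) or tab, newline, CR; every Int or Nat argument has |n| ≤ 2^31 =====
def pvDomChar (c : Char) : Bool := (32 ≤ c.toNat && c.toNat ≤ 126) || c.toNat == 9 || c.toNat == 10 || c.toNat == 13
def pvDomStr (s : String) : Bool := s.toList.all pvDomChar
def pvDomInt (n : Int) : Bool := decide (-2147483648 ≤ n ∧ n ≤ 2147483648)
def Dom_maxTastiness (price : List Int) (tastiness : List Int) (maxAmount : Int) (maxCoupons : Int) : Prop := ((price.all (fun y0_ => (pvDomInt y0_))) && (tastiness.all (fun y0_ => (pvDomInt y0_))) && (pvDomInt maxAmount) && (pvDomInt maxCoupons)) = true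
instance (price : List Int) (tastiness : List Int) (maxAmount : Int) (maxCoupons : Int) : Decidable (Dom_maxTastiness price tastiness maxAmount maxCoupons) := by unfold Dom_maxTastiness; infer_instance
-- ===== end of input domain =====

-- B replaces A's full (n+1)×(maxAmount+1)×(maxCoupons+1) table by a need-driven two-pass DP:
-- only states reachable from (maxAmount, maxCoupons) are ever evaluated; alternative decomposition.

-- ===== PORT A =====
-- dp[·][j][k] double indexing; the [] / 0 defaults are never taken on inputs satisfying Pre_ (indices provably in range)
def getD2 (rows : List (List Int)) (j k : Int) : Int :=
  PySem.List.pyGetD (PySem.List.pyGetD rows j []) k 0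

-- the three guarded assignments of A's inner loop body, for one cell (j, k)
def entryA (prev : List (List Int)) (p t j k : Int) : Int :=
  let v := getD2 prev j k
  let v := if j - p ≥ 0 then max v (getD2 prev (j - p) k + t) else v
  if k > 0 ∧ j - PySem.Int.floordiv p 2 ≥ 0 then
    max v (getD2 prev (j - PySem.Int.floordiv p 2) (k - 1) + t)
  else v

-- the two inner 'for j … for k …' loops writing row dp[i]
def buildRowA (prev : List (List Int)) (p t maxAmount maxCoupons : Int) : List (List Int) :=
  (PySem.List.pyRange 0 (maxAmount + 1)).map (fun j =>
    (PySem.List.pyRange 0 (maxCoupons + 1)).map (fun k => entryA prev p t j k))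

def maxTastiness (price : List Int) (tastiness : List Int) (maxAmount : Int) (maxCoupons : Int) : Int :=
  let n : Int := price.length
  let dp0 : List (List (List Int)) :=
    (PySem.List.pyRange 0 (n + 1)).map (fun _ =>
      (PySem.List.pyRange 0 (maxAmount + 1)).map (fun _ =>
        List.replicate (maxCoupons + 1).toNat 0))
  let dp := (PySem.List.pyRange 1 (n + 1)).foldl (fun dp i =>
      dp.set i.toNat (buildRowA (PySem.List.pyGetD dp (i - 1) [])
        (PySem.List.pyGetD price (i - 1) 0) (PySem.List.pyGetD tastiness (i - 1) 0)
        maxAmount maxCoupons)) dp0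
  PySem.List.pyGetD (PySem.List.pyGetD (PySem.List.pyGetD dp n []) maxAmount []) maxCoupons 0

-- ===== PORT B =====
-- one iteration of B's first pass: record the states level i-1 must provide for state ak of level i
def expandState (p : Int) (nxt : PySem.Set (Int × Int)) (ak : Int × Int) : PySem.Set (Int × Int) :=
  let nxt := PySem.Set.add nxt ak
  let nxt := if ak.1 - p ≥ 0 then PySem.Set.add nxt (ak.1 - p, ak.2) else nxt
  if ak.2 > 0 ∧ ak.1 - PySem.Int.floordiv p 2 ≥ 0 then
    PySem.Set.add nxt (ak.1 - PySem.Int.floordiv p 2, ak.2 - 1)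
  else nxt

def expandNeeded (p : Int) (cur : PySem.Set (Int × Int)) : PySem.Set (Int × Int) :=
  cur.foldl (expandState p) PySem.Set.empty

-- 'for p in reversed(price): levels.append(nxt)' — the top-down list of needed-state sets
def buildLevels (ps : List Int) (start : PySem.Set (Int × Int)) : List (PySem.Set (Int × Int)) :=
  match ps with
  | [] => [start]
  | p :: rest => start :: buildLevels rest (expandNeeded p start)

-- one iteration of B's second pass; vals.getD's default 0 is never taken: every key
-- looked up is in the previous level by construction (proved below)
def stepVals (vals : PySem.Dict (Int × Int) Int) (p t : Int) (need : PySem.Set (Int × Int)) :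
    PySem.Dict (Int × Int) Int :=
  need.foldl (fun new ak =>
    new.insert ak
      (let v := vals.getD (ak.1, ak.2) 0
       let v := if ak.1 - p ≥ 0 then max v (vals.getD (ak.1 - p, ak.2) 0 + t) else v
       if ak.2 > 0 ∧ ak.1 - PySem.Int.floordiv p 2 ≥ 0 then
         max v (vals.getD (ak.1 - PySem.Int.floordiv p 2, ak.2 - 1) 0 + t)
       else v)) PySem.Dict.empty

def maxTastiness_alt (price : List Int) (tastiness : List Int) (maxAmount : Int) (maxCoupons : Int) : Int :=
  let start : PySem.Set (Int × Int) := PySem.Set.add PySem.Set.empty (maxAmount, maxCoupons)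
  let levels := (buildLevels price.reverse start).reverse
  let vals0 := (PySem.List.pyGetD levels 0 PySem.Set.empty).foldl
      (fun d ak => d.insert ak 0) PySem.Dict.empty
  let vals := ((price.zip tastiness).zip (levels.drop 1)).foldl
      (fun vals x => stepVals vals x.1.1 x.1.2 x.2) vals0
  vals.getD (maxAmount, maxCoupons) 0

-- ===== PRECONDITION & SPEC =====
-- Pre_ excludes exactly: negative maxAmount/maxCoupons (A raises IndexError reading dp),
-- a negative price (A raises IndexError as soon as the loops run), and tastiness shorter than
-- price — there A raises IndexError except in the degenerate case where no item is affordable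
-- even halved (then A returns 0 while B raises IndexError reading tastiness[i-1] unconditionally).
def Pre_maxTastiness (price : List Int) (tastiness : List Int) (maxAmount : Int) (maxCoupons : Int) : Prop :=
  0 ≤ maxAmount ∧ 0 ≤ maxCoupons ∧ price.length ≤ tastiness.length ∧ ∀ p ∈ price, 0 ≤ p
instance (price : List Int) (tastiness : List Int) (maxAmount : Int) (maxCoupons : Int) : Decidable (Pre_maxTastiness price tastiness maxAmount maxCoupons) := by unfold Pre_maxTastiness; infer_instance

def pvWitness_maxTastiness : List Int × List Int × Int × Int := ([3, 1, 4], [5, 6, 7], 5, 1)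

def Spec_maxTastiness (price : List Int) (tastiness : List Int) (maxAmount : Int) (maxCoupons : Int) (out : Int) : Prop := out = maxTastiness_alt price tastiness maxAmount maxCoupons
instance (price : List Int) (tastiness : List Int) (maxAmount : Int) (maxCoupons : Int) (out : Int) : Decidable (Spec_maxTastiness price tastiness maxAmount maxCoupons out) := by unfold Spec_maxTastiness; infer_instance

-- ===== CLAIM (what is proved, stated in full; the proofs are below) =====
def Claim_equal_maxTastiness : Prop := ∀ (price : List Int) (tastiness : List Int) (maxAmount : Int) (maxCoupons : Int), Dom_maxTastiness price tastiness maxAmount maxCoupons → Pre_maxTastiness price tastiness maxAmount maxCoupons → Spec_maxTastiness price tastiness maxAmount maxCoupons (maxTastiness price tastiness maxAmount maxCoupons)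

-- ===== LEMMAS AND PROOFS =====

-- the common recurrence, over an abstract lookup g
def comb (p t : Int) (g : Int → Int → Int) (a k : Int) : Int :=
  let v := g a k
  let v := if a - p ≥ 0 then max v (g (a - p) k + t) else v
  if k > 0 ∧ a - PySem.Int.floordiv p 2 ≥ 0 then
    max v (g (a - PySem.Int.floordiv p 2) (k - 1) + t)
  else v

-- reference value: best tastiness using the given (price, tastiness) items, as a recursion
def SS : List (Int × Int) → Int → Int → Int
  | [], _, _ => 0
  | pt :: rest, a, k => comb pt.1 pt.2 (SS rest) a k

def itemsAt (price tastiness : List Int) (i : Nat) : List (Int × Int) :=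
  ((price.zip tastiness).take i).reverse

lemma comb_eq (p t a k : Int) (g g' : Int → Int → Int)
    (h1 : g a k = g' a k)
    (h2 : a - p ≥ 0 → g (a - p) k = g' (a - p) k)
    (h3 : k > 0 ∧ a - PySem.Int.floordiv p 2 ≥ 0 →
      g (a - PySem.Int.floordiv p 2) (k - 1) = g' (a - PySem.Int.floordiv p 2) (k - 1)) :
    comb p t g a k = comb p t g' a k := by
  unfold comb
  split_ifs with hh hg hg <;> simp_all

lemma itemsAt_succ (price tastiness : List Int) (i : Nat)
    (hi : i < price.length) (hlen : price.length ≤ tastiness.length) :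
    itemsAt price tastiness (i + 1)
      = (price[i]'hi, tastiness[i]'(by omega)) :: itemsAt price tastiness i := by
  have hiz : i < (price.zip tastiness).length := by
    simp [List.length_zip]; omega
  unfold itemsAt
  rw [List.take_add_one]
  rw [List.getElem?_eq_getElem hiz]
  simp [List.getElem_zip]

lemma lenRange (n : Nat) : (PySem.List.pyRange 0 ((n : Int) + 1)).length = n + 1 := by
  rw [show ((n : Int) + 1) = (((n + 1 : Nat) : Nat) : Int) by push_cast; ring,
      PySem.List.pyRange_zero_natCast]
  simp

lemma grid_getD (f : Int → Int → Int) (b c : Int) (j k : Int)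
    (hj0 : 0 ≤ j) (hjb : j < b) (hk0 : 0 ≤ k) (hkc : k < c) :
    getD2 ((PySem.List.pyRange 0 b).map (fun j => (PySem.List.pyRange 0 c).map (fun k => f j k)))
        j k = f j k := by
  unfold getD2
  rw [show b = ((b.toNat : Nat) : Int) by omega, show j = ((j.toNat : Nat) : Int) by omega,
      PySem.List.pyGetD_map_pyRange _ _ _ _ (by omega)]
  rw [show c = ((c.toNat : Nat) : Int) by omega, show k = ((k.toNat : Nat) : Int) by omega,
      PySem.List.pyGetD_map_pyRange _ _ _ _ (by omega)]

lemma getD_map_pyRange_const {α : Type} (n : Nat) (x : α) (d : α) (m : Nat) (hm : m < n + 1) :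
    ((PySem.List.pyRange 0 ((n : Int) + 1)).map (fun _ => x)).getD m d = x := by
  rw [List.getD_eq_getElem _ _ (by rw [List.length_map, lenRange]; omega)]
  simp

lemma pyGetD_replicate_zero (m : Nat) (k : Int) (h0 : 0 ≤ k) (h1 : k < (m : Int)) :
    PySem.List.pyGetD (List.replicate m (0 : Int)) k 0 = 0 := by
  rw [PySem.List.pyGetD_eq_getElem _ _ h0 (by simpa using h1)]
  simp

lemma A_inv (price tastiness : List Int) (ma mc : Int)
    (hma : 0 ≤ ma) (hmc : 0 ≤ mc)
    (hlen : price.length ≤ tastiness.length) (hpos : ∀ p ∈ price, 0 ≤ p)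
    (m : Nat) : m ≤ price.length →
    ((PySem.List.pyRange 1 ((m : Int) + 1)).foldl (fun dp i =>
        dp.set i.toNat (buildRowA (PySem.List.pyGetD dp (i - 1) [])
          (PySem.List.pyGetD price (i - 1) 0) (PySem.List.pyGetD tastiness (i - 1) 0)
          ma mc))
        ((PySem.List.pyRange 0 ((price.length : Int) + 1)).map (fun _ =>
          (PySem.List.pyRange 0 (ma + 1)).map (fun _ =>
            List.replicate (mc + 1).toNat 0)))).length = price.length + 1 ∧
    ∀ j k : Int, 0 ≤ j → j ≤ ma → 0 ≤ k → k ≤ mc →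
      getD2 (((PySem.List.pyRange 1 ((m : Int) + 1)).foldl (fun dp i =>
          dp.set i.toNat (buildRowA (PySem.List.pyGetD dp (i - 1) [])
            (PySem.List.pyGetD price (i - 1) 0) (PySem.List.pyGetD tastiness (i - 1) 0)
            ma mc))
          ((PySem.List.pyRange 0 ((price.length : Int) + 1)).map (fun _ =>
            (PySem.List.pyRange 0 (ma + 1)).map (fun _ =>
              List.replicate (mc + 1).toNat 0)))).getD m []) j k
        = SS (itemsAt price tastiness m) j k := by
  induction m with
  | zero =>
      intro _
      have hr : PySem.List.pyRange 1 (((0 : Nat) : Int) + 1) = [] := by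
        norm_num
      rw [hr, List.foldl_nil]
      constructor
      · rw [List.length_map, lenRange]
      · intro j k hj0 hj1 hk0 hk1
        rw [getD_map_pyRange_const price.length _ _ 0 (by omega)]
        show getD2 ((PySem.List.pyRange 0 (ma + 1)).map (fun _ =>
          List.replicate (mc + 1).toNat 0)) j k = _
        unfold getD2
        rw [show (ma + 1) = (((ma + 1).toNat : Nat) : Int) by omega,
            show j = ((j.toNat : Nat) : Int) by omega,
            PySem.List.pyGetD_map_pyRange _ _ _ _ (by omega)]
        rw [pyGetD_replicate_zero _ _ hk0 (by omega)]
        rfl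
  | succ m ih =>
      intro hm
      obtain ⟨ihlen, ihval⟩ := ih (by omega)
      have hm' : m < price.length := by omega
      have hr : PySem.List.pyRange 1 (((m + 1 : Nat) : Int) + 1)
          = PySem.List.pyRange 1 ((m : Int) + 1) ++ [(m : Int) + 1] := by
        push_cast
        exact PySem.List.pyRange_one_succ_right (by omega)
      rw [hr, List.foldl_append, List.foldl_cons, List.foldl_nil]
      have hsub : ((m : Int) + 1 - 1) = ((m : Nat) : Int) := by ring
      have htn : ((m : Int) + 1).toNat = m + 1 := by omega
      rw [hsub, htn, PySem.List.pyGetD_natCast, PySem.List.pyGetD_natCast,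
          PySem.List.pyGetD_natCast]
      have hp : price.getD m 0 = price[m]'hm' := List.getD_eq_getElem _ _ hm'
      have ht : tastiness.getD m 0 = tastiness[m]'(by omega) :=
        List.getD_eq_getElem _ _ (by omega)
      have hppos : 0 ≤ price[m]'hm' := hpos _ (List.getElem_mem _)
      have hhalf : 0 ≤ PySem.Int.floordiv (price[m]'hm') 2 := by
        rw [PySem.Int.floordiv_eq_ediv_of_pos (by norm_num)]
        exact Int.ediv_nonneg hppos (by norm_num)
      constructor
      · rw [List.length_set, ihlen]
      · intro j k hj0 hj1 hk0 hk1
        rw [List.getD_eq_getElem _ _ (by rw [List.length_set, ihlen]; omega),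
            List.getElem_set_self, hp, ht]
        rw [show buildRowA = fun prev p t ma mc =>
              (PySem.List.pyRange 0 (ma + 1)).map (fun j =>
                (PySem.List.pyRange 0 (mc + 1)).map (fun k => entryA prev p t j k)) from rfl]
        rw [grid_getD _ _ _ _ _ hj0 (by omega) hk0 (by omega)]
        rw [show entryA = fun prev p t j k => comb p t (getD2 prev) j k from rfl]
        rw [itemsAt_succ price tastiness m hm' hlen]
        show comb _ _ _ j k = comb _ _ (SS (itemsAt price tastiness m)) j k
        refine comb_eq _ _ _ _ _ _ ?_ ?_ ?_
        · exact ihval j k hj0 hj1 hk0 hk1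
        · intro hg
          exact ihval _ _ (by omega) (by omega) hk0 hk1
        · intro hg
          exact ihval _ _ (by omega) (by omega) (by omega) (by omega)

lemma A_eval (price tastiness : List Int) (maxAmount maxCoupons : Int)
    (hma : 0 ≤ maxAmount) (hmc : 0 ≤ maxCoupons)
    (hlen : price.length ≤ tastiness.length) (hpos : ∀ p ∈ price, 0 ≤ p) :
    maxTastiness price tastiness maxAmount maxCoupons
      = SS (itemsAt price tastiness price.length) maxAmount maxCoupons := by
  obtain ⟨hL, hval⟩ := A_inv price tastiness maxAmount maxCoupons hma hmc hlen hpos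
    price.length le_rfl
  simp only [maxTastiness]
  rw [PySem.List.pyGetD_natCast]
  exact hval maxAmount maxCoupons hma le_rfl hmc le_rfl

lemma mem_expandState_self (p : Int) (s : PySem.Set (Int × Int)) (ak x : Int × Int)
    (hx : x ∈ s) : x ∈ expandState p s ak := by
  unfold expandState
  split_ifs <;> simp [PySem.Set.mem_add, hx]

lemma mem_foldl_expandState (p : Int) (l : List (Int × Int)) (acc : PySem.Set (Int × Int))
    (x : Int × Int) (hx : x ∈ acc) : x ∈ l.foldl (expandState p) acc := by
  induction l generalizing acc with
  | nil => exact hx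
  | cons a l ih => exact ih _ (mem_expandState_self p acc a x hx)

lemma mem_expand_self (p : Int) (cur : PySem.Set (Int × Int)) (ak : Int × Int)
    (h : ak ∈ cur) : ak ∈ expandNeeded p cur := by
  unfold expandNeeded
  obtain ⟨l1, l2, rfl⟩ := List.append_of_mem h
  rw [List.foldl_append, List.foldl_cons]
  apply mem_foldl_expandState
  unfold expandState
  split_ifs <;> simp [PySem.Set.mem_add]

lemma mem_expand_child1 (p : Int) (cur : PySem.Set (Int × Int)) (ak : Int × Int)
    (h : ak ∈ cur) (hg : ak.1 - p ≥ 0) : (ak.1 - p, ak.2) ∈ expandNeeded p cur := by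
  unfold expandNeeded
  obtain ⟨l1, l2, rfl⟩ := List.append_of_mem h
  rw [List.foldl_append, List.foldl_cons]
  apply mem_foldl_expandState
  unfold expandState
  split_ifs <;> simp_all [PySem.Set.mem_add]

lemma mem_expand_child2 (p : Int) (cur : PySem.Set (Int × Int)) (ak : Int × Int)
    (h : ak ∈ cur) (hg : ak.2 > 0 ∧ ak.1 - PySem.Int.floordiv p 2 ≥ 0) :
    (ak.1 - PySem.Int.floordiv p 2, ak.2 - 1) ∈ expandNeeded p cur := by
  unfold expandNeeded
  obtain ⟨l1, l2, rfl⟩ := List.append_of_mem h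
  rw [List.foldl_append, List.foldl_cons]
  apply mem_foldl_expandState
  unfold expandState
  split_ifs <;> simp_all [PySem.Set.mem_add]

lemma dict_getD_foldl_insert_not_mem (f : Int × Int → Int) (l : List (Int × Int))
    (d0 : PySem.Dict (Int × Int) Int) (x : Int × Int) (hx : x ∉ l) :
    (l.foldl (fun d a => d.insert a (f a)) d0).getD x 0 = d0.getD x 0 := by
  induction l generalizing d0 with
  | nil => rfl
  | cons a l ih =>
      rw [List.foldl_cons, ih _ (by simp_all)]
      exact PySem.Dict.getD_insert_of_ne d0 (f a) 0 (by simp_all)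

lemma dict_getD_foldl_insert_mem (f : Int × Int → Int) (l : List (Int × Int))
    (d0 : PySem.Dict (Int × Int) Int) (x : Int × Int) (hx : x ∈ l) :
    (l.foldl (fun d a => d.insert a (f a)) d0).getD x 0 = f x := by
  induction l generalizing d0 with
  | nil => simp at hx
  | cons a l ih =>
      by_cases hxl : x ∈ l
      · rw [List.foldl_cons, ih _ hxl]
      · have hxa : x = a := by simp_all
        subst hxa
        rw [List.foldl_cons, dict_getD_foldl_insert_not_mem f l _ x hxl]
        exact PySem.Dict.getD_insert_self d0 x (f x) 0

lemma buildLevels_length (ps : List Int) (s : PySem.Set (Int × Int)) :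
    (buildLevels ps s).length = ps.length + 1 := by
  induction ps generalizing s with
  | nil => rfl
  | cons p rest ih => simp [buildLevels, ih]

lemma buildLevels_getD_zero (ps : List Int) (s : PySem.Set (Int × Int)) :
    (buildLevels ps s).getD 0 PySem.Set.empty = s := by
  cases ps <;> rfl

lemma buildLevels_getD_succ (ps : List Int) (s : PySem.Set (Int × Int)) (d : Nat)
    (hd : d < ps.length) :
    (buildLevels ps s).getD (d + 1) PySem.Set.empty
      = expandNeeded (ps.getD d 0) ((buildLevels ps s).getD d PySem.Set.empty) := by
  induction ps generalizing s d with
  | nil => simp at hd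
  | cons p rest ih =>
      rw [show buildLevels (p :: rest) s = s :: buildLevels rest (expandNeeded p s) from rfl]
      cases d with
      | zero =>
          rw [List.getD_cons_succ, List.getD_cons_zero, List.getD_cons_zero,
              buildLevels_getD_zero]
      | succ d =>
          rw [List.getD_cons_succ, List.getD_cons_succ, List.getD_cons_succ,
              ih (expandNeeded p s) d (by simpa using hd)]

lemma levels_get (price : List Int) (start : PySem.Set (Int × Int)) (i : Nat)
    (hi : i ≤ price.length) :
    (buildLevels price.reverse start).reverse.getD i PySem.Set.empty
      = (buildLevels price.reverse start).getD (price.length - i) PySem.Set.empty := by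
  have hL : (buildLevels price.reverse start).length = price.length + 1 := by
    rw [buildLevels_length, List.length_reverse]
  have h1 : i < (buildLevels price.reverse start).reverse.length := by
    rw [List.length_reverse, hL]; omega
  have h2 : price.length - i < (buildLevels price.reverse start).length := by omega
  rw [List.getD_eq_getElem _ _ h1, List.getD_eq_getElem _ _ h2, List.getElem_reverse]
  congr 1
  omega

lemma levels_adj (price : List Int) (start : PySem.Set (Int × Int)) (i : Nat)
    (hi : i < price.length) :
    (buildLevels price.reverse start).reverse.getD i PySem.Set.empty
      = expandNeeded (price.getD i 0)
          ((buildLevels price.reverse start).reverse.getD (i + 1) PySem.Set.empty) := by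
  rw [levels_get price start i (by omega), levels_get price start (i + 1) (by omega)]
  have hd : price.length - 1 - i < price.reverse.length := by
    rw [List.length_reverse]; omega
  have h := buildLevels_getD_succ price.reverse start (price.length - 1 - i) hd
  have hidx : price.length - 1 - i + 1 = price.length - i := by omega
  rw [hidx] at h
  have hp : price.reverse.getD (price.length - 1 - i) 0 = price.getD i 0 := by
    rw [List.getD_eq_getElem _ _ hd, List.getElem_reverse,
        List.getD_eq_getElem _ _ (by omega : i < price.length)]
    congr 1
    omega
  have hq : price.length - 1 - i = price.length - (i + 1) := by omega
  rw [h, hp, hq]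

lemma stepVals_getD (vals : PySem.Dict (Int × Int) Int) (p t : Int)
    (need : PySem.Set (Int × Int)) (g : Int → Int → Int)
    (hv : ∀ ak ∈ expandNeeded p need, vals.getD ak 0 = g ak.1 ak.2)
    (ak : Int × Int) (hak : ak ∈ need) :
    (stepVals vals p t need).getD ak 0 = comb p t g ak.1 ak.2 := by
  have h0 : (stepVals vals p t need).getD ak 0
      = comb p t (fun a k => vals.getD (a, k) 0) ak.1 ak.2 :=
    dict_getD_foldl_insert_mem
      (fun ak => comb p t (fun a k => vals.getD (a, k) 0) ak.1 ak.2) need _ ak hak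
  rw [h0]
  refine comb_eq _ _ _ _ _ _ ?_ ?_ ?_
  · simpa using hv ak (mem_expand_self p need ak hak)
  · intro hg
    simpa using hv (ak.1 - p, ak.2) (mem_expand_child1 p need ak hak hg)
  · intro hg
    simpa using hv (ak.1 - PySem.Int.floordiv p 2, ak.2 - 1) (mem_expand_child2 p need ak hak hg)

lemma B_inv (price tastiness : List Int) (ma mc : Int)
    (hlen : price.length ≤ tastiness.length) (i : Nat) :
    i ≤ price.length → ∀ ak ∈ (buildLevels price.reverse (PySem.Set.add PySem.Set.empty (ma, mc))).reverse.getD i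
        PySem.Set.empty,
      ((((price.zip tastiness).zip
            ((buildLevels price.reverse (PySem.Set.add PySem.Set.empty (ma, mc))).reverse.drop 1)).take i).foldl
          (fun vals x => stepVals vals x.1.1 x.1.2 x.2)
          ((PySem.List.pyGetD
              (buildLevels price.reverse (PySem.Set.add PySem.Set.empty (ma, mc))).reverse 0
              PySem.Set.empty).foldl (fun d ak => d.insert ak 0) PySem.Dict.empty)).getD ak 0
        = SS (itemsAt price tastiness i) ak.1 ak.2 := by
  set start : PySem.Set (Int × Int) := PySem.Set.add PySem.Set.empty (ma, mc) with hstart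
  set levels := (buildLevels price.reverse start).reverse with hlev
  have hLlen : levels.length = price.length + 1 := by
    rw [hlev, List.length_reverse, buildLevels_length, List.length_reverse]
  have hzip : (price.zip tastiness).length = price.length := by
    rw [List.length_zip]; omega
  have hzl : ((price.zip tastiness).zip (levels.drop 1)).length = price.length := by
    rw [List.length_zip, List.length_drop, hzip, hLlen]; omega
  have hpy : PySem.List.pyGetD levels 0 PySem.Set.empty = levels.getD 0 PySem.Set.empty := by
    rw [PySem.List.pyGetD_of_nonneg levels PySem.Set.empty le_rfl]
    rfl
  induction i with
  | zero =>
      intro _ ak hak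
      rw [List.take_zero, List.foldl_nil, hpy,
          dict_getD_foldl_insert_mem (fun _ => 0) _ _ ak hak]
      rfl
  | succ i ih =>
      intro hi ak hak
      have hi' : i < price.length := by omega
      have hizl : i < ((price.zip tastiness).zip (levels.drop 1)).length := by omega
      have hzget : ((price.zip tastiness).zip (levels.drop 1))[i]'hizl
          = ((price[i]'hi', tastiness[i]'(by omega)), levels.getD (i + 1) PySem.Set.empty) := by
        rw [List.getElem_zip]
        congr 1
        · rw [List.getElem_zip]
        · rw [List.getElem_drop, List.getD_eq_getElem _ _ (by omega : i + 1 < levels.length)]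
          congr 1
          omega
      have hadj := levels_adj price start i hi'
      rw [← hlev, List.getD_eq_getElem price _ hi'] at hadj
      have hv : ∀ bk ∈ expandNeeded (price[i]'hi') (levels.getD (i + 1) PySem.Set.empty),
          ((((price.zip tastiness).zip (levels.drop 1)).take i).foldl
              (fun vals x => stepVals vals x.1.1 x.1.2 x.2)
              ((PySem.List.pyGetD levels 0 PySem.Set.empty).foldl
                (fun d ak => d.insert ak 0) PySem.Dict.empty)).getD bk 0
            = SS (itemsAt price tastiness i) bk.1 bk.2 := by
        intro bk hbk
        exact ih (by omega) bk (by rw [hadj]; exact hbk)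
      rw [List.take_add_one, List.getElem?_eq_getElem hizl]
      simp only [Option.toList_some, List.foldl_append, List.foldl_cons, List.foldl_nil, hzget]
      rw [stepVals_getD _ _ _ _ (SS (itemsAt price tastiness i)) hv ak hak,
          itemsAt_succ price tastiness i hi' hlen]
      rfl

lemma B_eval (price tastiness : List Int) (maxAmount maxCoupons : Int)
    (hlen : price.length ≤ tastiness.length) :
    maxTastiness_alt price tastiness maxAmount maxCoupons
      = SS (itemsAt price tastiness price.length) maxAmount maxCoupons := by
  simp only [maxTastiness_alt]
  set start : PySem.Set (Int × Int) := PySem.Set.add PySem.Set.empty (maxAmount, maxCoupons)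
    with hstart
  set levels := (buildLevels price.reverse start).reverse with hlev
  have hLlen : levels.length = price.length + 1 := by
    rw [hlev, List.length_reverse, buildLevels_length, List.length_reverse]
  have hzl : ((price.zip tastiness).zip (levels.drop 1)).length = price.length := by
    rw [List.length_zip, List.length_drop, List.length_zip, hLlen]
    omega
  have hmem : (maxAmount, maxCoupons) ∈ levels.getD price.length PySem.Set.empty := by
    rw [hlev, levels_get price start price.length le_rfl, Nat.sub_self, buildLevels_getD_zero]
    simp [hstart]
  have h := B_inv price tastiness maxAmount maxCoupons hlen price.length le_rfl
    (maxAmount, maxCoupons) hmem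
  have htake : ((price.zip tastiness).zip (levels.drop 1)).take price.length
      = (price.zip tastiness).zip (levels.drop 1) := by
    rw [← hzl]
    exact List.take_length
  rw [htake] at h
  exact h

-- ===== VERDICT (by name: the statement is the Claim_ definition above) =====
theorem maxTastiness_spec : Claim_equal_maxTastiness := by
  intro price tastiness maxAmount maxCoupons _ hpre
  obtain ⟨hma, hmc, hlen, hpos⟩ := hpre
  unfold Spec_maxTastiness
  rw [A_eval price tastiness maxAmount maxCoupons hma hmc hlen hpos,
      B_eval price tastiness maxAmount maxCoupons hlen]
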